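-- pv_equiv track=rewrite | github.com/mediwind/PS_Algorithm | 백준/Gold/32506. Rhythm Flow/Rhythm Flow.py | rhythm_flow
-- ===== SOURCE A (Python) =====
-- def calculate_score(diff):
--     if 0 <= diff <= 15:
--         return 7
--     elif 16 <= diff <= 23:
--         return 6
--     elif 24 <= diff <= 43:
--         return 4
--     elif 44 <= diff <= 102:
--         return 2
--     else:
--         return 0
--
-- def rhythm_flow(n, m, expected, actual):
--     dp = [[0] * (n + 1) for _ in range(m + 1)]
--
--     for i in range(1, m + 1):
--         for j in range(1, n + 1):
--             score1 = calculate_score(abs(actual[i - 1] - expected[j - 1])) + dp[i - 1][j - 1]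
--             score2 = dp[i][j - 1]
--             score3 = dp[i - 1][j]
--             dp[i][j] = max(score1, score2, score3)
--
--     return dp[m][n]
-- ===== SOURCE B (Python) =====
-- def calculate_score(diff):
--     if 0 <= diff <= 15:
--         return 7
--     elif 16 <= diff <= 23:
--         return 6
--     elif 24 <= diff <= 43:
--         return 4
--     elif 44 <= diff <= 102:
--         return 2
--     else:
--         return 0
--
--
-- def rhythm_flow(n, m, expected, actual):
--     memo = {}
--
--     def solve(i, j):
--         if i == 0 or j == 0:
--             return 0
--         key = (i, j)
--         if key in memo:
--             return memo[key]
--         v = max(calculate_score(abs(actual[i - 1] - expected[j - 1])) + solve(i - 1, j - 1),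
--                 solve(i, j - 1),
--                 solve(i - 1, j))
--         memo[key] = v
--         return v
--
--     return solve(m, n)
-- ===== Notes on version B (the rewrite author's own statement) =====
-- stated objective: alternative
-- what changed: Replaces A's bottom-up (m+1)x(n+1) DP table filled by nested index loops with a top-down memoized recursion solve(i,j) over a dict, computing the same alignment value on demand from solve(m,n).
import Mathlib
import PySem

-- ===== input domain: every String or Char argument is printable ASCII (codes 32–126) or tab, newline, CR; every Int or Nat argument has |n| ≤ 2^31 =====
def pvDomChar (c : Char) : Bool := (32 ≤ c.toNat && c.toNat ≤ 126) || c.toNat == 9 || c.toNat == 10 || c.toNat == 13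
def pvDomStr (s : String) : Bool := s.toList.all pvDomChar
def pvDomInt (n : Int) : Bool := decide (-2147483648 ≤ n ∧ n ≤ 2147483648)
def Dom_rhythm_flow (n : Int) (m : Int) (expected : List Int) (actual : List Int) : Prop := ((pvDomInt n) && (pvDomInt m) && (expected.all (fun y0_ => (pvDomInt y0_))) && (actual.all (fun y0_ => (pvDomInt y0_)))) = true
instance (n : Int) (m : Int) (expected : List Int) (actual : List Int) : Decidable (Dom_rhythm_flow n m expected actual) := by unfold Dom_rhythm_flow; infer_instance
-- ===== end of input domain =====

-- B replaces A's bottom-up (m+1)×(n+1) DP table filled by nested index loops with a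
-- top-down memoized recursion solve(i,j) over a dict, evaluated on demand from solve(m,n).

-- ===== PORT A =====
def calculate_score (diff : Int) : Int :=
  if 0 ≤ diff ∧ diff ≤ 15 then 7
  else if 16 ≤ diff ∧ diff ≤ 23 then 6
  else if 24 ≤ diff ∧ diff ≤ 43 then 4
  else if 44 ≤ diff ∧ diff ≤ 102 then 2
  else 0

def rhythm_flow (n : Int) (m : Int) (expected : List Int) (actual : List Int) : Int :=
  let dp : List (List Int) := List.replicate (m + 1).toNat (List.replicate (n + 1).toNat (0 : Int))
  let dp := (PySem.List.pyRange 1 (m + 1) 1).foldl (fun dp i =>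
    (PySem.List.pyRange 1 (n + 1) 1).foldl (fun dp j =>
      let score1 := calculate_score |PySem.List.pyGetD actual (i - 1) 0 - PySem.List.pyGetD expected (j - 1) 0| +
        PySem.List.pyGetD (PySem.List.pyGetD dp (i - 1) []) (j - 1) 0
      let score2 := PySem.List.pyGetD (PySem.List.pyGetD dp i []) (j - 1) 0
      let score3 := PySem.List.pyGetD (PySem.List.pyGetD dp (i - 1) []) j 0
      PySem.List.pySetD dp i (PySem.List.pySetD (PySem.List.pyGetD dp i []) j (max score1 (max score2 score3)))) dp) dp
  PySem.List.pyGetD (PySem.List.pyGetD dp m []) n 0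

-- ===== PORT B =====
-- solve(i, j) with the memo dict threaded through explicitly (Python's closure-captured
-- `memo`); recursive calls in the order B makes them.  i, j are the nonnegative loop
-- indices, so they are Nat here; Python's list indexing actual[i-1]/expected[j-1] is exact
-- on the admitted (in-range) inputs.
def solveB (expected actual : List Int) :
    Nat → Nat → PySem.Dict (Nat × Nat) Int → Int × PySem.Dict (Nat × Nat) Int
  | 0, _, memo => (0, memo)
  | _ + 1, 0, memo => (0, memo)
  | i + 1, j + 1, memo =>
    match memo.get? (i + 1, j + 1) with
    | some v => (v, memo)
    | none =>
      let r1 := solveB expected actual i j memo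
      let r2 := solveB expected actual (i + 1) j r1.2
      let r3 := solveB expected actual i (j + 1) r2.2
      let v := max (calculate_score |PySem.List.pyGetD actual (i : Int) 0 -
                      PySem.List.pyGetD expected (j : Int) 0| + r1.1) (max r2.1 r3.1)
      (v, r3.2.insert (i + 1, j + 1) v)
  termination_by i j _ => (i, j)

def rhythm_flow_alt (n : Int) (m : Int) (expected : List Int) (actual : List Int) : Int :=
  (solveB expected actual m.toNat n.toNat PySem.Dict.empty).1

-- ===== PRECONDITION & SPEC =====
-- Pre_ excludes exactly the inputs on which A raises IndexError: negative n or m (dp[m][n]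
-- out of range) and, when both loops run (n ≥ 1 and m ≥ 1), n or m exceeding the length of
-- expected resp. actual.
def Pre_rhythm_flow (n : Int) (m : Int) (expected : List Int) (actual : List Int) : Prop :=
  0 ≤ n ∧ 0 ≤ m ∧ (n = 0 ∨ m = 0 ∨ (n ≤ (expected.length : Int) ∧ m ≤ (actual.length : Int)))
instance (n : Int) (m : Int) (expected : List Int) (actual : List Int) : Decidable (Pre_rhythm_flow n m expected actual) := by unfold Pre_rhythm_flow; infer_instance
def pvWitness_rhythm_flow : Int × Int × List Int × List Int := (2, 2, [10, 40], [12, 200])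

def Spec_rhythm_flow (n : Int) (m : Int) (expected : List Int) (actual : List Int) (out : Int) : Prop := out = rhythm_flow_alt n m expected actual
instance (n : Int) (m : Int) (expected : List Int) (actual : List Int) (out : Int) : Decidable (Spec_rhythm_flow n m expected actual out) := by unfold Spec_rhythm_flow; infer_instance

-- ===== CLAIM (what is proved, stated in full; the proofs are below) =====
def Claim_equal_rhythm_flow : Prop := ∀ (n : Int) (m : Int) (expected : List Int) (actual : List Int), Dom_rhythm_flow n m expected actual → Pre_rhythm_flow n m expected actual → Spec_rhythm_flow n m expected actual (rhythm_flow n m expected actual)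

-- ===== LEMMAS AND PROOFS =====

-- named copies of the loop bodies of A's port (definitionally equal to the lambdas)
def innerA (expected actual : List Int) (i : Int) (dp : List (List Int)) (j : Int) : List (List Int) :=
  let score1 := calculate_score |PySem.List.pyGetD actual (i - 1) 0 - PySem.List.pyGetD expected (j - 1) 0| +
    PySem.List.pyGetD (PySem.List.pyGetD dp (i - 1) []) (j - 1) 0
  let score2 := PySem.List.pyGetD (PySem.List.pyGetD dp i []) (j - 1) 0
  let score3 := PySem.List.pyGetD (PySem.List.pyGetD dp (i - 1) []) j 0
  PySem.List.pySetD dp i (PySem.List.pySetD (PySem.List.pyGetD dp i []) j (max score1 (max score2 score3)))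

def outerA (expected actual : List Int) (n : Int) (dp : List (List Int)) (i : Int) : List (List Int) :=
  (PySem.List.pyRange 1 (n + 1) 1).foldl (innerA expected actual i) dp

theorem rhythm_flow_def (n m : Int) (expected actual : List Int) :
    rhythm_flow n m expected actual =
      PySem.List.pyGetD (PySem.List.pyGetD
        ((PySem.List.pyRange 1 (m + 1) 1).foldl (outerA expected actual n)
          (List.replicate (m + 1).toNat (List.replicate (n + 1).toNat (0 : Int)))) m []) n 0 := rfl

-- The alignment DP both programs compute, recursing on the number of actual
-- notes (first index) and expected notes (second index) considered.
def F (e a : List Int) : Nat → Nat → Int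
  | _, 0 => 0
  | 0, _ + 1 => 0
  | i + 1, j + 1 =>
      max (calculate_score |a.getD i 0 - e.getD j 0| + F e a i j)
          (max (F e a (i + 1) j) (F e a i (j + 1)))
  termination_by i j => (i, j)

theorem F_zero_left (e a : List Int) (j : Nat) : F e a 0 j = 0 := by
  cases j <;> simp [F]

theorem F_zero_right (e a : List Int) (i : Nat) : F e a i 0 = 0 := by
  cases i <;> simp [F]

theorem F_succ (e a : List Int) (i j : Nat) :
    F e a (i + 1) (j + 1) =
      max (calculate_score |a.getD i 0 - e.getD j 0| + F e a i j)
          (max (F e a (i + 1) j) (F e a i (j + 1))) := by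
  simp [F]

-- generic invariant rule for a foldl over List.range
theorem foldl_range_inv {σ : Type} (g : σ → Nat → σ) (P : Nat → σ → Prop) :
    ∀ (M : Nat) (s0 : σ), P 0 s0 → (∀ k s, k < M → P k s → P (k + 1) (g s k)) →
    P M ((List.range M).foldl g s0) := by
  intro M
  induction M with
  | zero => intro s0 h0 _; simpa using h0
  | succ M ih =>
    intro s0 h0 hs
    rw [List.range_succ, List.foldl_append]
    exact hs M _ (by omega) (ih s0 h0 (fun k s hk => hs k s (by omega)))

theorem set_map_range {α : Type} (f : Nat → α) (k p : Nat) (v : α) :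
    ((List.range k).map f).set p v = (List.range k).map (fun q => if q = p then v else f q) := by
  apply List.ext_getElem
  · simp
  · intro i hi hi2
    rw [List.getElem_set]
    simp only [List.getElem_map, List.getElem_range]
    by_cases h : p = i
    · subst h
      simp only [List.length_set, List.length_map, List.length_range] at hi
      simp
    · rw [if_neg h, if_neg (show ¬ i = p from fun hh => h hh.symm)]

theorem getD_map_range' {α : Type} (f : Nat → α) (k p : Nat) (d : α) (hp : p < k) :
    ((List.range k).map f).getD p d = f p := by
  have h : p < ((List.range k).map f).length := by simp [hp]
  rw [List.getD_eq_getElem _ _ h]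
  simp

-- descriptions of A's table during the computation
def rowF (e a : List Int) (N i : Nat) : List Int :=
  (List.range (N + 1)).map (fun q => F e a i q)

def partRow (e a : List Int) (N i j : Nat) : List Int :=
  (List.range (N + 1)).map (fun q => if q ≤ j then F e a i q else 0)

def matA (e a : List Int) (N M i : Nat) : List (List Int) :=
  (List.range (M + 1)).map (fun p => if p ≤ i then rowF e a N p else List.replicate (N + 1) 0)

def matI (e a : List Int) (N M i j : Nat) : List (List Int) :=
  (List.range (M + 1)).map (fun p =>
    if p < i then rowF e a N p else if p = i then partRow e a N i j else List.replicate (N + 1) 0)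

theorem rowF_zero (e a : List Int) (N : Nat) : rowF e a N 0 = List.replicate (N + 1) 0 := by
  apply List.ext_getElem
  · simp [rowF]
  · intro i hi hi2
    simp [rowF, F_zero_left]

theorem partRow_zero (e a : List Int) (N i : Nat) :
    partRow e a N i 0 = List.replicate (N + 1) 0 := by
  apply List.ext_getElem
  · simp [partRow]
  · intro q hq hq2
    simp only [partRow, List.getElem_map, List.getElem_range, List.getElem_replicate]
    by_cases h : q = 0
    · subst h; simp [F_zero_right]
    · rw [if_neg (by omega)]

theorem partRow_full (e a : List Int) (N i : Nat) : partRow e a N i N = rowF e a N i := by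
  unfold partRow rowF
  apply List.map_congr_left
  intro q hq
  simp only [List.mem_range] at hq
  simp [Nat.lt_succ_iff.mp hq]

theorem matA_zero (e a : List Int) (N M : Nat) :
    matA e a N M 0 = List.replicate (M + 1) (List.replicate (N + 1) 0) := by
  apply List.ext_getElem
  · simp [matA]
  · intro p hp hp2
    simp only [matA, List.getElem_map, List.getElem_range, List.getElem_replicate]
    by_cases h : p = 0
    · subst h; simp [rowF_zero]
    · rw [if_neg (by omega)]

theorem matI_zero (e a : List Int) (N M i : Nat) :
    matI e a N M (i + 1) 0 = matA e a N M i := by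
  unfold matI matA
  apply List.map_congr_left
  intro p hp
  by_cases h1 : p < i + 1
  · rw [if_pos h1, if_pos (by omega)]
  · rw [if_neg h1, if_neg (show ¬ p ≤ i by omega)]
    by_cases h2 : p = i + 1
    · rw [if_pos h2, partRow_zero]
    · rw [if_neg h2]

theorem matI_full (e a : List Int) (N M i : Nat) :
    matI e a N M (i + 1) N = matA e a N M (i + 1) := by
  unfold matI matA
  apply List.map_congr_left
  intro p hp
  by_cases h1 : p < i + 1
  · rw [if_pos h1, if_pos (by omega)]
  · rw [if_neg h1]
    by_cases h2 : p = i + 1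
    · rw [if_pos h2, if_pos (by omega), partRow_full, h2]
    · rw [if_neg h2, if_neg (show ¬ p ≤ i + 1 by omega)]

theorem matI_update (e a : List Int) (N M i k : Nat) :
    (matI e a N M (i + 1) k).set (i + 1)
      ((partRow e a N (i + 1) k).set (k + 1) (F e a (i + 1) (k + 1))) = matI e a N M (i + 1) (k + 1) := by
  unfold matI
  rw [set_map_range]
  apply List.map_congr_left
  intro p hp
  by_cases h : p = i + 1
  · subst h
    rw [if_pos rfl, if_neg (by omega), if_pos rfl]
    unfold partRow
    rw [set_map_range]
    apply List.map_congr_left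
    intro q hq
    by_cases h2 : q = k + 1
    · subst h2; simp
    · rw [if_neg h2]
      by_cases h3 : q ≤ k
      · rw [if_pos h3, if_pos (by omega)]
      · rw [if_neg h3, if_neg (by omega)]
  · rw [if_neg h]
    by_cases h1 : p < i + 1
    · rw [if_pos h1, if_pos h1]
    · rw [if_neg h1, if_neg h1, if_neg h, if_neg h]

theorem stepA (e a : List Int) (N M i k : Nat) (hi : i + 1 ≤ M) (hk : k < N) :
    innerA e a ((i : Int) + 1) (matI e a N M (i + 1) k) (1 + (k : Int)) = matI e a N M (i + 1) (k + 1) := by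
  have h3 : ((i : Int) + 1) = ((i + 1 : Nat) : Int) := by push_cast; ring
  have h4 : ((1 : Int) + (k : Int)) = ((k + 1 : Nat) : Int) := by push_cast; ring
  unfold innerA
  simp only [h3, h4]
  have h5 : ((i + 1 : Nat) : Int) - 1 = ((i : Nat) : Int) := by push_cast; ring
  have h6 : ((k + 1 : Nat) : Int) - 1 = ((k : Nat) : Int) := by push_cast; ring
  simp only [h5, h6, PySem.List.pyGetD_natCast, PySem.List.pySetD_natCast]
  have e1 : (matI e a N M (i + 1) k).getD i [] = rowF e a N i := by
    unfold matI
    rw [getD_map_range' _ _ _ _ (by omega)]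
    rw [if_pos (by omega)]
  have e2 : (matI e a N M (i + 1) k).getD (i + 1) [] = partRow e a N (i + 1) k := by
    unfold matI
    rw [getD_map_range' _ _ _ _ (by omega)]
    rw [if_neg (by omega), if_pos rfl]
  have e3 : (rowF e a N i).getD k 0 = F e a i k := by
    unfold rowF; rw [getD_map_range' _ _ _ _ (by omega)]
  have e4 : (rowF e a N i).getD (k + 1) 0 = F e a i (k + 1) := by
    unfold rowF; rw [getD_map_range' _ _ _ _ (by omega)]
  have e5 : (partRow e a N (i + 1) k).getD k 0 = F e a (i + 1) k := by
    unfold partRow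
    rw [getD_map_range' _ _ _ _ (by omega)]
    rw [if_pos (le_refl k)]
  rw [e1, e2, e3, e4, e5, ← F_succ]
  exact matI_update e a N M i k

theorem stepOuterA (e a : List Int) (N M i : Nat) (hi : i + 1 ≤ M) :
    outerA e a (N : Int) (matA e a N M i) ((i : Int) + 1) = matA e a N M (i + 1) := by
  unfold outerA
  rw [PySem.List.pyRange_one]
  have hb : (((N : Int) + 1) - 1).toNat = N := by omega
  rw [hb, List.foldl_map]
  have h0 : matA e a N M i = matI e a N M (i + 1) 0 := (matI_zero e a N M i).symm
  rw [h0]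
  have hinv := foldl_range_inv (fun dp k => innerA e a ((i : Int) + 1) dp (1 + (k : Int)))
      (fun k dp => dp = matI e a N M (i + 1) k) N (matI e a N M (i + 1) 0) rfl
      (fun k dp hk hdp => by rw [hdp]; exact stepA e a N M i k hi hk)
  rw [hinv]
  exact matI_full e a N M i

theorem rhythm_flow_eq_F (N M : Nat) (e a : List Int) :
    rhythm_flow (N : Int) (M : Int) e a = F e a M N := by
  rw [rhythm_flow_def]
  rw [PySem.List.pyRange_one]
  have hb : (((M : Int) + 1) - 1).toNat = M := by omega
  rw [hb, List.foldl_map]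
  have hrep : List.replicate ((M : Int) + 1).toNat (List.replicate ((N : Int) + 1).toNat (0 : Int)) = matA e a N M 0 := by
    rw [matA_zero, show ((M : Int) + 1).toNat = M + 1 by omega, show ((N : Int) + 1).toNat = N + 1 by omega]
  rw [hrep]
  have hinv := foldl_range_inv (fun dp k => outerA e a (N : Int) dp (1 + (k : Int)))
      (fun i dp => dp = matA e a N M i) M (matA e a N M 0) rfl
      (fun k dp hk hdp => by
        show outerA e a (N : Int) dp (1 + (k : Int)) = matA e a N M (k + 1)
        rw [hdp, show (1 : Int) + (k : Int) = (k : Int) + 1 by ring]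
        exact stepOuterA e a N M k (by omega))
  rw [hinv]
  simp only [PySem.List.pyGetD_natCast]
  have hA : (matA e a N M M).getD M [] = rowF e a N M := by
    unfold matA
    rw [getD_map_range' _ _ _ _ (by omega)]
    rw [if_pos (le_refl M)]
  rw [hA]
  unfold rowF
  rw [getD_map_range' _ _ _ _ (by omega)]

-- B-side: every value stored in the memo is the corresponding F value
def MemoOK (e a : List Int) (memo : PySem.Dict (Nat × Nat) Int) : Prop :=
  ∀ (p : Nat × Nat) (v : Int), memo.get? p = some v → v = F e a p.1 p.2

theorem solveB_correct (e a : List Int) (i j : Nat) (memo : PySem.Dict (Nat × Nat) Int) :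
    MemoOK e a memo →
      (solveB e a i j memo).1 = F e a i j ∧ MemoOK e a (solveB e a i j memo).2 := by
  induction i, j, memo using solveB.induct (expected := e) (actual := a) with
  | case1 x memo =>
    intro hm
    exact ⟨by simp [solveB, F_zero_left], by simpa [solveB] using hm⟩
  | case2 n memo =>
    intro hm
    exact ⟨by simp [solveB, F_zero_right], by simpa [solveB] using hm⟩
  | case3 i j memo v hget =>
    intro hm
    refine ⟨?_, ?_⟩
    · simp only [solveB, hget]
      exact hm _ _ hget
    · simpa only [solveB, hget] using hm
  | case4 i j memo hget r1 r2 ih1 ih2 ih2x ih3 =>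
    intro hm
    have h1 := ih1 hm
    have h2 := ih2 h1.2
    have h3 := ih3 h2.2
    simp only [solveB, hget]
    refine ⟨?_, ?_⟩
    · rw [h1.1, h2.1, h3.1, PySem.List.pyGetD_natCast, PySem.List.pyGetD_natCast, ← F_succ]
    · intro p w hpw
      rw [PySem.Dict.get?_insert] at hpw
      split at hpw
      · rename_i hp
        subst hp
        cases hpw
        rw [h1.1, h2.1, h3.1, PySem.List.pyGetD_natCast, PySem.List.pyGetD_natCast, ← F_succ]
      · exact h3.2 _ _ hpw

theorem rhythm_flow_alt_eq_F (N M : Nat) (e a : List Int) :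
    rhythm_flow_alt (N : Int) (M : Int) e a = F e a M N := by
  have h := solveB_correct e a ((M : Int)).toNat ((N : Int)).toNat PySem.Dict.empty
    (fun p v h => by simp [PySem.Dict.get?_empty] at h)
  unfold rhythm_flow_alt
  rw [h.1]
  simp

-- ===== VERDICT (by name: the statement is the Claim_ definition above) =====
theorem rhythm_flow_spec : Claim_equal_rhythm_flow := by
  intro n m e a _ hpre
  obtain ⟨hn, hm, _⟩ := hpre
  unfold Spec_rhythm_flow
  obtain ⟨N, rfl⟩ : ∃ N : Nat, n = (N : Int) := ⟨n.toNat, (Int.toNat_of_nonneg hn).symm⟩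
  obtain ⟨M, rfl⟩ : ∃ M : Nat, m = (M : Int) := ⟨m.toNat, (Int.toNat_of_nonneg hm).symm⟩
  rw [rhythm_flow_eq_F, rhythm_flow_alt_eq_F]
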